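-- pv_equiv track=rewrite | github.com/naramdash/algorithm | goorm/49095 고장난컴퓨터/solution.py | solve
-- ===== SOURCE A (Python) =====
-- def solve(input_timestamps, retention_time):
--     input_count_on_screen = 0
--     last_input_timestamp = 0
--
--     for input_timestamp in input_timestamps:
--         if input_timestamp - last_input_timestamp > retention_time:
--             input_count_on_screen = 0
--         input_count_on_screen += 1
--         last_input_timestamp = input_timestamp
--
--     return input_count_on_screen
-- ===== SOURCE B (Python) =====
-- def solve(input_timestamps, retention_time):
--     # Backward scan: the answer is the length of the maximal suffix in which
--     # every consecutive gap is <= retention_time.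
--     n = len(input_timestamps)
--     if n == 0:
--         return 0
--     count = 1
--     i = n - 1
--     while i >= 1 and input_timestamps[i] - input_timestamps[i - 1] <= retention_time:
--         count += 1
--         i -= 1
--     return count
-- ===== Notes on version B (the rewrite author's own statement) =====
-- stated objective: alternative
-- what changed: Replaces A's forward fold carrying a reset counter and last-timestamp state with a backward scan from the end that counts the maximal suffix of consecutive gaps <= retention_time and stops at the first large gap.
import Mathlib
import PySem

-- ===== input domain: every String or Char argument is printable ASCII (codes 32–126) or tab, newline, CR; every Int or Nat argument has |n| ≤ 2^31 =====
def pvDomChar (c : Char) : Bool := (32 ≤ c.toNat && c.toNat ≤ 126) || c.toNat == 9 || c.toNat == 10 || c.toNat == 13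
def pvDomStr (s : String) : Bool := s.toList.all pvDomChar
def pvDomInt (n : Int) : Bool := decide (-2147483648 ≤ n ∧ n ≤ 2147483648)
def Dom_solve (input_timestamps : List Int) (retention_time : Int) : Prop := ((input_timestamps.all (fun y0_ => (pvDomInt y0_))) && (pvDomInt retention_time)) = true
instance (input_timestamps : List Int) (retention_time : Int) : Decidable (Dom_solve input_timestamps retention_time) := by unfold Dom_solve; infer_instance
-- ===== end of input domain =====

-- B replaces A's forward fold (counter with reset + last-timestamp state) by a backward
-- scan counting the maximal suffix of consecutive gaps ≤ retention_time (alternative decomposition).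

-- ===== PORT A =====
-- literal port of A's forward loop carrying (input_count_on_screen, last_input_timestamp)
def solve (input_timestamps : List Int) (retention_time : Int) : Int :=
  (input_timestamps.foldl
    (fun (st : Int × Int) t =>
      let c := if t - st.2 > retention_time then 0 else st.1
      (c + 1, t))
    (0, 0)).1

-- ===== PORT B =====
-- backward while-loop of Source B: walking from the last element towards the front,
-- counting while the gap stays ≤ retention_time, stopping at the first large gap.
def solveAltRun (retention_time : Int) (cur : Int) : List Int → Int
  | [] => 0
  | prev :: rest =>
    if cur - prev ≤ retention_time then 1 + solveAltRun retention_time prev rest else 0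

def solve_alt (input_timestamps : List Int) (retention_time : Int) : Int :=
  match input_timestamps.reverse with
  | [] => 0
  | x :: rest => 1 + solveAltRun retention_time x rest

-- ===== PRECONDITION & SPEC =====
def Spec_solve (input_timestamps : List Int) (retention_time : Int) (out : Int) : Prop := out = solve_alt input_timestamps retention_time
instance (input_timestamps : List Int) (retention_time : Int) (out : Int) : Decidable (Spec_solve input_timestamps retention_time out) := by unfold Spec_solve; infer_instance

-- ===== CLAIM (what is proved, stated in full; the proofs are below) =====
def Claim_equal_solve : Prop := ∀ (input_timestamps : List Int) (retention_time : Int), Dom_solve input_timestamps retention_time → Spec_solve input_timestamps retention_time (solve input_timestamps retention_time)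

-- ===== LEMMAS AND PROOFS =====

-- A's fold over rest.reverse ++ [x] ends in state (1 + backward run from x over rest, x)
theorem solve_fold_run (r x : Int) (rest : List Int) :
    List.foldl
      (fun (st : Int × Int) t =>
        let c := if t - st.2 > r then 0 else st.1
        (c + 1, t))
      (0, 0) (rest.reverse ++ [x]) = (1 + solveAltRun r x rest, x) := by
  induction rest generalizing x with
  | nil => simp [solveAltRun]
  | cons y ys ih =>
    have h : (y :: ys).reverse ++ [x] = (ys.reverse ++ [y]) ++ [x] := by simp
    rw [h, List.foldl_append, ih y]
    simp only [List.foldl, solveAltRun]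
    by_cases hle : x - y ≤ r
    · rw [if_neg (by omega), if_pos hle]; ring_nf
    · rw [if_pos (by omega), if_neg hle]; ring_nf

-- ===== VERDICT (by name: the statement is the Claim_ definition above) =====
theorem solve_spec : Claim_equal_solve := by
  intro ts r _
  unfold Spec_solve solve solve_alt
  cases h : ts.reverse with
  | nil =>
    have : ts = [] := by simpa using congrArg List.reverse h
    simp [this]
  | cons x rest =>
    have hts : ts = rest.reverse ++ [x] := by
      have := congrArg List.reverse h
      simpa using this
    rw [hts, solve_fold_run]
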